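-- pv_equiv track=rewrite | github.com/IlyasMakari/jelly-analysis | analysis_functions.py | function_count_in_path
-- ===== SOURCE A (Python) =====
-- def ancestors(element, json_graph):
--     ancestors_list = []
--     if 'parent' not in element:
--         return ancestors_list
--     parent_element_id = element['parent']
--     parent_element = next((e for e in json_graph if e.get('id') == parent_element_id), None)
--     if parent_element:
--         ancestors_list.append(parent_element)
--         ancestors_list.extend(ancestors(parent_element, json_graph))
--     return ancestors_list
--
-- def function_count_in_path(json_graph, packages):
--     """
--     Count the number of functions in the graph where an ancestor package has a fullName in the given packages list.
--
--     Parameters: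
--         json_graph (list): A list of dictionaries representing the nodes and edges of the graph.
--         packages (list): A list of package names to filter (e.g., ['pkg1@1.0.0', 'pkg2@2.0.0']).
--     Returns:
--         int: The count of functions in the path.
--     """
--     # Filter for function elements from the json_graph
--     functions = [node for node in json_graph if node.get("kind") == "function"]
--
--     # Count functions whose ancestors include a package in the given packages list
--     function_count = 0
--     for function in functions:
--         function_ancestors = ancestors(function, json_graph)
--
--         # Check if any ancestor has kind "package" and a fullName in the given packages list
--         matches = any(
--             ancestor.get("kind") == "package" and ancestor.get("fullName") in packages
--             for ancestor in function_ancestors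
--         )
--
--         if matches:
--             function_count += 1
--
--     return function_count
-- ===== SOURCE B (Python) =====
-- def function_count_in_path(json_graph, packages):
--     """
--     Count the number of functions in the graph where an ancestor package has a fullName in the given packages list.
--     One first-occurrence id->node index built once replaces A's recursive ancestor-list building with
--     repeated linear scans; each function's chain is then walked iteratively with an early exit.
--     """
--     index = {}
--     for node in json_graph:
--         nid = node.get("id")
--         if nid is not None and nid not in index:
--             index[nid] = node
--     pkgs = set(packages)
--     count = 0
--     for node in json_graph:
--         if node.get("kind") != "function":
--             continue
--         cur = node
--         found = False
--         # a chain longer than len(json_graph)+1 hops must revisit a node (cycle), so stop there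
--         for _ in range(len(json_graph) + 1):
--             pid = cur.get("parent")
--             if pid is None:
--                 break
--             nxt = index.get(pid)
--             if nxt is None:
--                 break
--             if nxt.get("kind") == "package" and nxt.get("fullName") in pkgs:
--                 found = True
--                 break
--             cur = nxt
--         if found:
--             count += 1
--     return count
-- ===== Notes on version B (the rewrite author's own statement) =====
-- stated objective: alternative
-- what changed: B builds a first-occurrence id->node dict once and walks each function's parent chain iteratively with an early exit and a hop bound, instead of A's per-function recursive construction of the full ancestor list with a fresh linear scan of the whole graph per hop.
import Mathlib
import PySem

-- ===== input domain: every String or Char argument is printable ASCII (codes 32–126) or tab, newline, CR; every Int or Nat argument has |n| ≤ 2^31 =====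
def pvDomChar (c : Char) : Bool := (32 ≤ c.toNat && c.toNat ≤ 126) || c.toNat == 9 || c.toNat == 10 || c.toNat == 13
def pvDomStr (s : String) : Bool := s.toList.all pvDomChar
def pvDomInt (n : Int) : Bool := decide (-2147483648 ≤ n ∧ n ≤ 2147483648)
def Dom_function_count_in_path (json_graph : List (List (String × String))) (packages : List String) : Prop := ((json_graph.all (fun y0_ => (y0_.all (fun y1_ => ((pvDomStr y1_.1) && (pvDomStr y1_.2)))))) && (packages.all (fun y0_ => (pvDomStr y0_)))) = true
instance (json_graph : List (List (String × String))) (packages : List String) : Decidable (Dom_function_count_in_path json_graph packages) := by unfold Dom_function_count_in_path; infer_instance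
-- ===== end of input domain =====

-- B replaces A's per-function recursive ancestor-list building (linear graph scan per hop) by one
-- first-occurrence id->node dict plus an iterative, early-exiting, hop-bounded chain walk (objective: alternative).
-- Equivalence of the RETURN value; A's recursion is ported with fuel |g|+1, exact under Pre_ (acyclic chains).

-- ===== PORT A =====
-- next((e for e in json_graph if e.get('id') == parent_element_id), None)
def pvLookupId (json_graph : List (List (String × String))) (pid : String) :
    Option (List (String × String)) :=
  json_graph.find? (fun e => (PySem.Dict.mk e).get? "id" == some pid)

-- ancestors(element, json_graph); recursion carried by fuel, sufficient under Pre_ (chains end within |g|+1 hops)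
def pvAncestorsA (json_graph : List (List (String × String))) :
    Nat → List (String × String) → List (List (String × String))
  | 0, _ => []
  | fuel + 1, element =>
    match (PySem.Dict.mk element).get? "parent" with
    | none => []
    | some pid =>
      match pvLookupId json_graph pid with
      | none => []
      | some pe => pe :: pvAncestorsA json_graph fuel pe

-- ancestor.get("kind") == "package" and ancestor.get("fullName") in packages
def pvMatchesA (packages : List String) (a : List (String × String)) : Bool :=
  ((PySem.Dict.mk a).get? "kind" == some "package") &&
    (match (PySem.Dict.mk a).get? "fullName" with
     | some f => packages.contains f
     | none => false)

def function_count_in_path (json_graph : List (List (String × String))) (packages : List String) : Int :=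
  let functions := json_graph.filter (fun node => (PySem.Dict.mk node).get? "kind" == some "function")
  functions.foldl
    (fun function_count f =>
      let function_ancestors := pvAncestorsA json_graph (json_graph.length + 1) f
      if function_ancestors.any (pvMatchesA packages) then function_count + 1 else function_count)
    0

-- ===== PORT B =====
-- index = {}; for node: if nid is not None and nid not in index: index[nid] = node
def pvIndexB (json_graph : List (List (String × String))) :
    PySem.Dict String (List (String × String)) :=
  json_graph.foldl
    (fun d node =>
      match (PySem.Dict.mk node).get? "id" with
      | none => d
      | some nid => if d.contains nid then d else d.insert nid node)
    PySem.Dict.empty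

-- the bounded inner 'for _ in range(len(json_graph)+1)' walk with early exits
def pvWalkB (index : PySem.Dict String (List (String × String))) (pkgs : PySem.Set String) :
    Nat → List (String × String) → Bool
  | 0, _ => false
  | fuel + 1, cur =>
    match (PySem.Dict.mk cur).get? "parent" with
    | none => false
    | some pid =>
      match index.get? pid with
      | none => false
      | some nxt =>
        if ((PySem.Dict.mk nxt).get? "kind" == some "package") &&
            (match (PySem.Dict.mk nxt).get? "fullName" with
             | some f => PySem.Set.contains pkgs f
             | none => false)
        then true
        else pvWalkB index pkgs fuel nxt

def function_count_in_path_alt (json_graph : List (List (String × String))) (packages : List String) : Int :=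
  let index := pvIndexB json_graph
  let pkgs := PySem.Set.ofList packages
  json_graph.foldl
    (fun count node =>
      if (PySem.Dict.mk node).get? "kind" == some "function" then
        if pvWalkB index pkgs (json_graph.length + 1) node then count + 1 else count
      else count)
    0

-- ===== PRECONDITION & SPEC =====
-- the parent id recorded at id i (none when i resolves to no element, or that element has no parent)
def pvParentOf (json_graph : List (List (String × String))) (i : String) : Option String :=
  (json_graph.find? (fun e => (PySem.Dict.mk e).get? "id" == some i)).bind
    (fun e => (PySem.Dict.mk e).get? "parent")

def pvStepP (json_graph : List (List (String × String))) : Option String → Option String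
  | none => none
  | some i => pvParentOf json_graph i

-- Pre_ excludes exactly the graphs on which some function's parent chain cycles (the chain of parent
-- ids never reaches a dead end): Python A's unbounded recursion raises RecursionError there.  An
-- acyclic chain passes at most |g| distinct resolvable ids, so it dies within |g|+1 steps.
def Pre_function_count_in_path (json_graph : List (List (String × String))) (packages : List String) : Prop :=
  ∀ e ∈ json_graph, (PySem.Dict.mk e).get? "kind" = some "function" →
    ((PySem.Dict.mk e).get? "parent").all
      (fun p => (List.range (json_graph.length + 2)).any
        (fun k => (pvStepP json_graph)^[k] (some p) == none)) = true

instance (json_graph : List (List (String × String))) (packages : List String) : Decidable (Pre_function_count_in_path json_graph packages) := by unfold Pre_function_count_in_path; infer_instance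

def pvWitness_function_count_in_path : (List (List (String × String))) × List String :=
  ([[("id", "a"), ("kind", "package"), ("fullName", "p")], [("kind", "function"), ("parent", "a")]], ["p"])

def Spec_function_count_in_path (json_graph : List (List (String × String))) (packages : List String) (out : Int) : Prop := out = function_count_in_path_alt json_graph packages
instance (json_graph : List (List (String × String))) (packages : List String) (out : Int) : Decidable (Spec_function_count_in_path json_graph packages out) := by unfold Spec_function_count_in_path; infer_instance

-- ===== CLAIM (what is proved, stated in full; the proofs are below) =====
def Claim_equal_function_count_in_path : Prop := ∀ (json_graph : List (List (String × String))) (packages : List String), Dom_function_count_in_path json_graph packages → Pre_function_count_in_path json_graph packages → Spec_function_count_in_path json_graph packages (function_count_in_path json_graph packages)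


-- ===== LEMMAS AND PROOFS =====

-- B's first-occurrence index answers exactly A's first-match linear scan
theorem pvIndexB_get?_aux (pid : String) :
    ∀ (g : List (List (String × String))) (acc : PySem.Dict String (List (String × String))),
      (g.foldl
        (fun d node =>
          match (PySem.Dict.mk node).get? "id" with
          | none => d
          | some nid => if d.contains nid then d else d.insert nid node) acc).get? pid =
      match acc.get? pid with
      | some v => some v
      | none => pvLookupId g pid := by
  intro g
  induction g with
  | nil =>
    intro acc
    simp [pvLookupId]
    cases acc.get? pid <;> simp
  | cons e g ih =>
    intro acc
    simp only [List.foldl_cons]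
    cases hid : (PySem.Dict.mk e).get? "id" with
    | none =>
      rw [ih]
      have hpred : ((PySem.Dict.mk e).get? "id" == some pid) = false := by
        rw [hid]; rfl
      simp [pvLookupId, List.find?, hpred]
    | some nid =>
      by_cases hc : acc.contains nid = true
      · simp only [hc, reduceIte]
        rw [ih]
        cases hacc : acc.get? pid with
        | some v => rfl
        | none =>
          have hne : nid ≠ pid := by
            intro h; subst h
            rw [PySem.Dict.contains_eq_isSome_get?, hacc] at hc
            simp at hc
          have hpred : ((PySem.Dict.mk e).get? "id" == some pid) = false := by
            rw [hid]; simp [hne]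
          simp [pvLookupId, List.find?, hpred]
      · simp only [Bool.not_eq_true] at hc
        simp only [hc, Bool.false_eq_true, if_false]
        rw [ih]
        by_cases hpe : pid = nid
        · subst hpe
          rw [PySem.Dict.get?_insert_self]
          have hpred : ((PySem.Dict.mk e).get? "id" == some pid) = true := by
            rw [hid]; simp
          have hnone : acc.get? pid = none := by
            rw [PySem.Dict.contains_eq_isSome_get?] at hc
            cases h : acc.get? pid with
            | none => rfl
            | some v => rw [h] at hc; simp at hc
          simp [pvLookupId, List.find?, hpred, hnone]
        · rw [PySem.Dict.get?_insert_of_ne _ _ hpe]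
          cases hacc : acc.get? pid with
          | some v => rfl
          | none =>
            have hpred : ((PySem.Dict.mk e).get? "id" == some pid) = false := by
              rw [hid]; simp [Ne.symm hpe]
            simp [pvLookupId, List.find?, hpred]

theorem pvIndexB_get? (g : List (List (String × String))) (pid : String) :
    (pvIndexB g).get? pid = pvLookupId g pid := by
  unfold pvIndexB
  rw [pvIndexB_get?_aux]
  simp [PySem.Dict.get?_empty]

-- membership checks against set(packages) and against the list agree
theorem pvMatches_walkcheck (packages : List String) (a : List (String × String)) :
    (((PySem.Dict.mk a).get? "kind" == some "package") &&
      (match (PySem.Dict.mk a).get? "fullName" with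
       | some f => PySem.Set.contains (PySem.Set.ofList packages) f
       | none => false)) = pvMatchesA packages a := by
  unfold pvMatchesA
  cases (PySem.Dict.mk a).get? "fullName" with
  | none => rfl
  | some f =>
    simp only []
    congr 1
    simp [PySem.Set.contains, PySem.Set.mem_ofList]

-- the early-exiting walk computes A's any-over-the-ancestor-list, fuel for fuel
theorem pvWalk_eq_any (g : List (List (String × String))) (packages : List String) :
    ∀ (fuel : Nat) (e : List (String × String)),
      pvWalkB (pvIndexB g) (PySem.Set.ofList packages) fuel e =
        (pvAncestorsA g fuel e).any (pvMatchesA packages) := by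
  intro fuel
  induction fuel with
  | zero => intro e; simp [pvWalkB, pvAncestorsA]
  | succ fuel ih =>
    intro e
    rw [pvWalkB, pvAncestorsA]
    cases (PySem.Dict.mk e).get? "parent" with
    | none => simp
    | some pid =>
      simp only [pvIndexB_get?]
      cases pvLookupId g pid with
      | none => simp
      | some pe =>
        simp only [List.any_cons]
        rw [ih, pvMatches_walkcheck]
        by_cases h : pvMatchesA packages pe = true
        · simp [h]
        · simp [h]

theorem ports_agree (g : List (List (String × String))) (packages : List String) :
    function_count_in_path g packages = function_count_in_path_alt g packages := by
  unfold function_count_in_path function_count_in_path_alt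
  rw [PySem.List.foldl_if_eq_foldl_filter
    (p := fun node => (PySem.Dict.mk node).get? "kind" == some "function")
    (f := fun count node =>
      if pvWalkB (pvIndexB g) (PySem.Set.ofList packages) (g.length + 1) node then count + 1 else count)]
  apply PySem.List.foldl_congr_mem
  intro acc x _
  rw [pvWalk_eq_any]

-- ===== VERDICT (by name: the statement is the Claim_ definition above) =====
theorem function_count_in_path_spec : Claim_equal_function_count_in_path := by
  intro g packages _ _
  unfold Spec_function_count_in_path
  exact ports_agree g packages
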